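-- pv_equiv track=rewrite | github.com/pypi-data/pypi-mirror-400 | packages/treesitter-chunker/treesitter_chunker-2.2.1-py3-none-any.whl/chunker/contracts/discovery_stub.py | check_grammar_updates
-- ===== SOURCE A (Python) =====
-- def check_grammar_updates(
--     installed_grammars: dict[str, str],
-- ) -> dict[str, tuple[str, str]]:
--     """Stub that simulates updates available"""
--     updates = {}
--     for lang, version in installed_grammars.items():
--         if (lang == "python" and version < "0.20.0") or (
--             lang == "rust" and version < "0.20.0"
--         ):
--             updates[lang] = version, "0.20.0"
--     return updates
-- ===== SOURCE B (Python) =====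
-- def check_grammar_updates(
--     installed_grammars: dict[str, str],
-- ) -> dict[str, tuple[str, str]]:
--     """Stub that simulates updates available (two targeted lookups instead of a scan)."""
--     updates = {}
--     pv = installed_grammars.get("python")
--     if pv is not None and pv < "0.20.0":
--         updates["python"] = pv, "0.20.0"
--     rv = installed_grammars.get("rust")
--     if rv is not None and rv < "0.20.0":
--         updates["rust"] = rv, "0.20.0"
--     return updates
-- ===== Notes on version B (the rewrite author's own statement) =====
-- stated objective: alternative
-- what changed: The loop over all installed grammars is removed; B does two guarded dict lookups ('python', 'rust') and builds the result from those alone.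
import Mathlib
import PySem

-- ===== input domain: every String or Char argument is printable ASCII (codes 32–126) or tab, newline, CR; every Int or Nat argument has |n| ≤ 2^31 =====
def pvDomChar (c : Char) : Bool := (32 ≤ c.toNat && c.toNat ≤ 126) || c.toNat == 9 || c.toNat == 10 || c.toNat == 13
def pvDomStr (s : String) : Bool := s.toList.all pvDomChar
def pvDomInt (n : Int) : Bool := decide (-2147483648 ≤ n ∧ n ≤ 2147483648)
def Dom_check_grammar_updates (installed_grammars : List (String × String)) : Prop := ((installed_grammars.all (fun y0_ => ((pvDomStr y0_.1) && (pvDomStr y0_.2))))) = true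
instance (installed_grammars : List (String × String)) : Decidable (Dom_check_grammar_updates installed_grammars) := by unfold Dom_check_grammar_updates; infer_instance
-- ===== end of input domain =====

-- B replaces A's scan over all installed grammars by two guarded lookups of the only
-- relevant keys ("python", "rust"); objective: alternative (targeted lookups, no loop).


-- entry qualifying as a python (resp. rust) update: used by A's condition and by Pre_
def pvQualPy (p : String × String) : Bool := p.1 == "python" && decide (p.2.toList < "0.20.0".toList)
def pvQualRs (p : String × String) : Bool := p.1 == "rust" && decide (p.2.toList < "0.20.0".toList)

-- ===== PORT A =====
def check_grammar_updates (installed_grammars : List (String × String)) : List (String × String × String) :=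
  (installed_grammars.foldl
    (fun (updates : PySem.Dict String (String × String)) lv =>
      if pvQualPy lv || pvQualRs lv then updates.insert lv.1 (lv.2, "0.20.0") else updates)
    PySem.Dict.empty).items

-- ===== PORT B =====
def check_grammar_updates_alt (installed_grammars : List (String × String)) : List (String × String × String) :=
  let d : PySem.Dict String String := PySem.Dict.mk installed_grammars
  let updates : PySem.Dict String (String × String) := PySem.Dict.empty
  let updates :=
    match d.get? "python" with
    | some pv => if pv.toList < "0.20.0".toList then updates.insert "python" ((pv, "0.20.0") : String × String) else updates
    | none => updates
  let updates :=
    match d.get? "rust" with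
    | some rv => if rv.toList < "0.20.0".toList then updates.insert "rust" ((rv, "0.20.0") : String × String) else updates
    | none => updates
  updates.items

-- ===== PRECONDITION & SPEC =====
-- a qualifying rust entry strictly before a qualifying python entry
def pvRustFirst : List (String × String) → Bool
  | [] => false
  | p :: t => (pvQualRs p && t.any pvQualPy) || pvRustFirst t

-- Pre_ excludes association lists with duplicate keys (a Python dict argument cannot contain
-- them) and lists where a qualifying "rust" entry precedes a qualifying "python" entry: there
-- A's and B's results are equal as Python dicts (dict == ignores order) but A's insertion
-- order is rust-then-python while B's is python-then-rust, an accidental corner neither spec fixes.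
def Pre_check_grammar_updates (installed_grammars : List (String × String)) : Prop :=
  (installed_grammars.map Prod.fst).Nodup ∧ pvRustFirst installed_grammars = false
instance (installed_grammars : List (String × String)) : Decidable (Pre_check_grammar_updates installed_grammars) := by unfold Pre_check_grammar_updates; infer_instance

def pvWitness_check_grammar_updates : (List (String × String)) :=
  [("python", "0.19.0"), ("go", "1.0"), ("rust", "0.1.0")]

def Spec_check_grammar_updates (installed_grammars : List (String × String)) (out : List (String × String × String)) : Prop := out = check_grammar_updates_alt installed_grammars
instance (installed_grammars : List (String × String)) (out : List (String × String × String)) : Decidable (Spec_check_grammar_updates installed_grammars out) := by unfold Spec_check_grammar_updates; infer_instance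

-- ===== CLAIM (what is proved, stated in full; the proofs are below) =====
def Claim_equal_check_grammar_updates : Prop := ∀ (installed_grammars : List (String × String)), Dom_check_grammar_updates installed_grammars → Pre_check_grammar_updates installed_grammars → Spec_check_grammar_updates installed_grammars (check_grammar_updates installed_grammars)

-- ===== LEMMAS AND PROOFS =====

def pvEmap (p : String × String) : String × String × String := (p.1, p.2, "0.20.0")

-- the python (resp. rust) fragment of B's output
def pvPyPart (g : List (String × String)) : List (String × String × String) :=
  match (PySem.Dict.mk g).get? "python" with
  | some pv => if pv.toList < "0.20.0".toList then [("python", pv, "0.20.0")] else []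
  | none => []

def pvRsPart (g : List (String × String)) : List (String × String × String) :=
  match (PySem.Dict.mk g).get? "rust" with
  | some rv => if rv.toList < "0.20.0".toList then [("rust", rv, "0.20.0")] else []
  | none => []

theorem alt_eq_parts (g : List (String × String)) :
    check_grammar_updates_alt g = pvPyPart g ++ pvRsPart g := by
  unfold check_grammar_updates_alt pvPyPart pvRsPart
  cases hp : (PySem.Dict.mk g).get? "python" <;>
    cases hr : (PySem.Dict.mk g).get? "rust" <;>
    simp only [hp, hr] <;>
    (try split_ifs) <;>
    simp [PySem.Dict.empty, PySem.Dict.insert, PySem.Dict.contains]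

theorem get?_eq_none_of_not_mem (g : List (String × String)) (k : String)
    (h : k ∉ g.map Prod.fst) : (PySem.Dict.mk g).get? k = none := by
  rw [PySem.Dict.get?_eq_none_iff_not_mem_keys]
  simpa using h

theorem filter_qualRs_eq_nil (t : List (String × String))
    (h : "rust" ∉ t.map Prod.fst) : t.filter pvQualRs = [] := by
  rw [List.filter_eq_nil_iff]
  intro p hp
  simp only [pvQualRs, Bool.and_eq_true, beq_iff_eq, not_and]
  intro hk
  exact absurd (List.mem_map.mpr ⟨p, hp, hk⟩) h

theorem rsPart_spec (t : List (String × String)) (hnd : (t.map Prod.fst).Nodup) :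
    (t.filter pvQualRs).map pvEmap = pvRsPart t := by
  induction t with
  | nil => rfl
  | cons p t ih =>
    obtain ⟨k, v⟩ := p
    simp only [List.map_cons, List.nodup_cons] at hnd
    unfold pvRsPart
    rw [PySem.Dict.get?_mk_cons]
    by_cases hk : k = "rust"
    · subst hk
      have ht : t.filter pvQualRs = [] := filter_qualRs_eq_nil t hnd.1
      simp only [List.filter_cons, pvQualRs, beq_self_eq_true, Bool.true_and, ht]
      split <;> simp_all [pvEmap]
    · have hq : pvQualRs (k, v) = false := by simp [pvQualRs, hk]
      have hb : (k == "rust") = false := by simp [hk]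
      simp only [List.filter_cons, hq, Bool.false_eq_true, if_false, hb]
      simpa [pvRsPart] using ih hnd.2

theorem pyPart_eq_nil_of_no_qual (t : List (String × String))
    (h : t.any pvQualPy = false) : pvPyPart t = [] := by
  unfold pvPyPart
  cases hp : (PySem.Dict.mk t).get? "python" with
  | none => rfl
  | some v =>
    have hmem : ("python", v) ∈ t := by
      by_contra hmem
      by_cases hk : "python" ∈ t.map Prod.fst
      · -- first match: get? returns a pair actually in t
        have := PySem.Dict.mem_items_of_get?_eq_some (d := PySem.Dict.mk t) hp
        exact hmem this
      · rw [get?_eq_none_of_not_mem t _ hk] at hp; cases hp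
    by_cases hv : v.toList < "0.20.0".toList
    · exfalso
      have : pvQualPy ("python", v) = true := by simp [pvQualPy]; exact hv
      have := List.any_eq_true.mpr ⟨("python", v), hmem, this⟩
      rw [h] at this; cases this
    · simpa using hv

theorem main_filter (g : List (String × String)) (hnd : (g.map Prod.fst).Nodup)
    (hrf : pvRustFirst g = false) :
    (g.filter (fun p => pvQualPy p || pvQualRs p)).map pvEmap = pvPyPart g ++ pvRsPart g := by
  induction g with
  | nil => rfl
  | cons p t ih =>
    simp only [List.map_cons, List.nodup_cons] at hnd
    simp only [pvRustFirst, Bool.or_eq_false_iff, Bool.and_eq_false_iff] at hrf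
    by_cases hpy : pvQualPy p = true
    · have hk : p.1 = "python" := by
        simp only [pvQualPy, Bool.and_eq_true, beq_iff_eq] at hpy; exact hpy.1
      have hv : p.2.toList < "0.20.0".toList := by
        simp only [pvQualPy, Bool.and_eq_true, decide_eq_true_eq] at hpy; exact hpy.2
      have hnopyt : "python" ∉ t.map Prod.fst := hk ▸ hnd.1
      -- tail has no python key, so the combined filter on t is the rust filter
      have hcong : t.filter (fun p => pvQualPy p || pvQualRs p) = t.filter pvQualRs := by
        apply List.filter_congr
        intro x hx
        have : pvQualPy x = false := by
          by_contra hc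
          have hx1 : x.1 = "python" := by
            simp only [Bool.not_eq_false, pvQualPy, Bool.and_eq_true, beq_iff_eq] at hc
            exact hc.1
          exact hnopyt (List.mem_map.mpr ⟨x, hx, hx1⟩)
        simp [this]
      have hpyPart : pvPyPart (p :: t) = [pvEmap p] := by
        unfold pvPyPart
        rw [PySem.Dict.get?_mk_cons]
        have : (p.1 == "python") = true := by simp [hk]
        simp only [this, if_true]
        obtain ⟨k, w⟩ := p
        simp only at hk; subst hk
        rw [if_pos hv]; simp [pvEmap]
      have hrsPart : pvRsPart (p :: t) = pvRsPart t := by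
        unfold pvRsPart
        rw [PySem.Dict.get?_mk_cons]
        have : (p.1 == "rust") = false := by simp [hk]
        simp only [this, Bool.false_eq_true, if_false]
      rw [hpyPart, hrsPart]
      simp only [List.filter_cons, hpy, Bool.true_or, if_true, List.map_cons,
        hcong, rsPart_spec t hnd.2, List.cons_append, List.nil_append]
    · by_cases hrs : pvQualRs p = true
      · have hk : p.1 = "rust" := by
          simp only [pvQualRs, Bool.and_eq_true, beq_iff_eq] at hrs; exact hrs.1
        have hv : p.2.toList < "0.20.0".toList := by
          simp only [pvQualRs, Bool.and_eq_true, decide_eq_true_eq] at hrs; exact hrs.2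
        have hnorust : "rust" ∉ t.map Prod.fst := hk ▸ hnd.1
        have hanyt : t.any pvQualPy = false := by
          rcases hrf.1 with h | h
          · rw [hrs] at h; cases h
          · exact h
        have hcong : t.filter (fun p => pvQualPy p || pvQualRs p) = t.filter pvQualRs := by
          apply List.filter_congr
          intro x hx
          have : pvQualPy x = false := by
            by_contra hc
            have hc' : pvQualPy x = true := by simpa using hc
            have := List.any_eq_true.mpr ⟨x, hx, hc'⟩
            rw [hanyt] at this; cases this
          simp [this]
        have hfil : t.filter pvQualRs = [] := filter_qualRs_eq_nil t hnorust
        have hpyPart : pvPyPart (p :: t) = [] := by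
          have h1 : pvPyPart t = [] := pyPart_eq_nil_of_no_qual t hanyt
          unfold pvPyPart
          rw [PySem.Dict.get?_mk_cons]
          have : (p.1 == "python") = false := by simp [hk]
          simp only [this, Bool.false_eq_true, if_false]
          simpa [pvPyPart] using h1
        have hrsPart : pvRsPart (p :: t) = [pvEmap p] := by
          unfold pvRsPart
          rw [PySem.Dict.get?_mk_cons]
          have : (p.1 == "rust") = true := by simp [hk]
          simp only [this, if_true]
          obtain ⟨k, w⟩ := p
          simp only at hk; subst hk
          rw [if_pos hv]; simp [pvEmap]
        rw [hpyPart, hrsPart]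
        simp only [List.filter_cons, hrs, hpy, Bool.false_or, if_true, List.map_cons,
          hcong, hfil, List.map_nil, List.nil_append]
      · -- head does not qualify: drop it on both sides
        have hpyb : pvQualPy p = false := by simpa using hpy
        have hrsb : pvQualRs p = false := by simpa using hrs
        have hpyPart : pvPyPart (p :: t) = pvPyPart t := by
          unfold pvPyPart
          rw [PySem.Dict.get?_mk_cons]
          by_cases hk : p.1 = "python"
          · have hv : ¬ p.2.toList < "0.20.0".toList := by
              intro hv; rw [show pvQualPy p = true by simp [pvQualPy, hk]; exact hv] at hpyb; cases hpyb
            have hno : "python" ∉ t.map Prod.fst := hk ▸ hnd.1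
            rw [show (p.1 == "python") = true by simp [hk]]
            simp only [if_true]
            rw [if_neg hv]
            simp [get?_eq_none_of_not_mem t _ hno, pvPyPart]
          · rw [show (p.1 == "python") = false by simp [hk]]
            simp
        have hrsPart : pvRsPart (p :: t) = pvRsPart t := by
          unfold pvRsPart
          rw [PySem.Dict.get?_mk_cons]
          by_cases hk : p.1 = "rust"
          · have hv : ¬ p.2.toList < "0.20.0".toList := by
              intro hv; rw [show pvQualRs p = true by simp [pvQualRs, hk]; exact hv] at hrsb; cases hrsb
            have hno : "rust" ∉ t.map Prod.fst := hk ▸ hnd.1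
            rw [show (p.1 == "rust") = true by simp [hk]]
            simp only [if_true]
            rw [if_neg hv]
            simp [get?_eq_none_of_not_mem t _ hno, pvRsPart]
          · rw [show (p.1 == "rust") = false by simp [hk]]
            simp
        simp only [List.filter_cons, hpyb, hrsb, Bool.or_self, Bool.false_eq_true, if_false,
          hpyPart, hrsPart]
        exact ih hnd.2 hrf.2

theorem a_eq_filter (g : List (String × String)) (hnd : (g.map Prod.fst).Nodup) :
    check_grammar_updates g = (g.filter (fun p => pvQualPy p || pvQualRs p)).map pvEmap := by
  unfold check_grammar_updates
  rw [← List.foldl_filter]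
  rw [PySem.Dict.items_foldl_insert_fresh (k := Prod.fst) (v := fun p => (p.2, "0.20.0"))]
  · simp [PySem.Dict.empty, pvEmap]
  · intro a _; simp [PySem.Dict.empty]
  · exact (List.Sublist.map Prod.fst List.filter_sublist).nodup hnd

-- ===== VERDICT (by name: the statement is the Claim_ definition above) =====
theorem check_grammar_updates_spec : Claim_equal_check_grammar_updates := by
  intro g _ hpre
  unfold Spec_check_grammar_updates
  rw [alt_eq_parts, a_eq_filter g hpre.1, main_filter g hpre.1 hpre.2]
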